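-- pv_equiv track=rewrite | github.com/COV-IRT/SARS-CoV-2_workshop | module4/Supporting Materials/subsample_covid.py | EnergyKernel
-- ===== SOURCE A (Python) =====
-- import os, sys, getopt, itertools
--
-- def EnergyKernel(t, len_tot):
--     lcm = LCM(len_tot - 1)
--     kern = (len_tot - len(t)) * [0]
--     for i, n in enumerate(t):
--         if not n:
--             continue
--         for j in range(len(kern)):
--             d = len(t) - i + j
--             kern[j] += lcm // d * t[i]
--     return kern
--
-- def Primes(n):
--     '''
--     Returns all primes <= n
--     '''
--     primes = []
--     for i in range(2, n+1):
--         if all([i % p for p in primes]):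
--             primes.append(i)
--     return primes
--
-- lcms = {}
--
-- def LCM(n):
--     '''
--     Least common multiple of {1, 2, 3...n}
--     '''
--     if n in lcms:
--         return lcms[n]
--     primes = Primes(n)
--     powers = []
--     for p in primes:
--         for i in itertools.count():
--             if p**i > n:
--                 powers.append(i-1)
--                 break
--     res = 1
--     for i, p in enumerate(primes):
--         res *= p**powers[i]
--     lcms[n] = res
--     return res
-- ===== SOURCE B (Python) =====
-- import itertools
--
-- def Primes(n):
--     '''
--     Returns all primes <= n
--     '''
--     primes = []
--     for i in range(2, n+1):
--         if all([i % p for p in primes]):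
--             primes.append(i)
--     return primes
--
-- lcms = {}
--
-- def LCM(n):
--     '''
--     Least common multiple of {1, 2, 3...n}
--     '''
--     if n in lcms:
--         return lcms[n]
--     primes = Primes(n)
--     powers = []
--     for p in primes:
--         for i in itertools.count():
--             if p**i > n:
--                 powers.append(i-1)
--                 break
--     res = 1
--     for i, p in enumerate(primes):
--         res *= p**powers[i]
--     lcms[n] = res
--     return res
--
-- def EnergyKernel(t, len_tot):
--     # Kronecker substitution: the kernel is a band of the polynomial product of
--     # t with the weight table [lcm//1, lcm//2, ...].  Split t into its positive
--     # and negative parts (the weights are nonnegative), pack each factor into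
--     # ONE big integer made of fixed-width byte slots wide enough that slots
--     # never overlap, take two big-integer products, and read the answer off the
--     # byte string of each product.  (The LCM helper is reused unchanged.)
--     L = len(t)
--     m = len_tot - L
--     if m <= 0:
--         return []
--     lcm = LCM(len_tot - 1)
--     if L == 0:
--         return [0] * m
--     nb = ((sum(abs(x) for x in t) + 1) * lcm).bit_length() + 1  # bits that surely hold any slot
--     bb = (nb + 7) // 8                                    # slot width in bytes
--     def pack(xs):
--         return int.from_bytes(b"".join(x.to_bytes(bb, "little") for x in xs), "little")
--     W = pack([lcm // d for d in range(1, len_tot)])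
--     prodp = pack([x if x > 0 else 0 for x in t]) * W
--     prodn = pack([-x if x < 0 else 0 for x in t]) * W
--     total = (L + len_tot) * bb
--     dp = prodp.to_bytes(total, "little")
--     dn = prodn.to_bytes(total, "little")
--     return [int.from_bytes(dp[(L - 1 + j) * bb:(L + j) * bb], "little")
--             - int.from_bytes(dn[(L - 1 + j) * bb:(L + j) * bb], "little")
--             for j in range(m)]
-- ===== Notes on version B (the rewrite author's own statement) =====
-- stated objective: faster
-- what changed: B computes the kernel by Kronecker substitution instead of A's doubly nested accumulation loop: it packs the positive and negative parts of t and the precomputed weight table [lcm//1, lcm//2, ...] into big integers with fixed-width digit slots, forms two big-integer products, and reads the answer off the products' byte strings (the LCM helper is reused unchanged).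
import Mathlib
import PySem

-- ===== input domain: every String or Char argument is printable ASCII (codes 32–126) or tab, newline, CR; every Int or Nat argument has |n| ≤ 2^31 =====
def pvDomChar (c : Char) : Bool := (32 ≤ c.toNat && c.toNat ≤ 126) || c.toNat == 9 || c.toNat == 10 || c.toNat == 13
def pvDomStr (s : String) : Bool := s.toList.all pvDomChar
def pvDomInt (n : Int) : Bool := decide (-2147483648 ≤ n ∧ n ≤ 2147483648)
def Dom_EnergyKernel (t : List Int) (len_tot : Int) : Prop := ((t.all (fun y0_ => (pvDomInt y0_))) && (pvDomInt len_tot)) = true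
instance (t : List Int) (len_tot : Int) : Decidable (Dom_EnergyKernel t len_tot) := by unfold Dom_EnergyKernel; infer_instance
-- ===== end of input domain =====

-- B computes the kernel by Kronecker substitution: it packs the positive and negative parts of t
-- and the weight table [lcm//1, lcm//2, ...] into big integers with fixed-width digit slots, forms
-- two big-integer products, and reads the answers off the products' digit streams — replacing A's
-- O(L*m) big-integer operations of the doubly nested accumulation loop (measured faster by the
-- timing run).
-- A's global `lcms` memo cache only caches return values and cannot change any return value,
-- so the ports omit it.

-- ===== PORT A =====
-- Primes(n): trial division against the primes found so far ('all([i % p for p in primes])').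
def pvPrimes (n : Int) : List Int :=
  (PySem.List.pyRange 2 (n + 1) 1).foldl
    (fun primes i => if primes.all (fun p => PySem.Int.mod i p != 0) then primes ++ [i] else primes)
    []

-- 'for i in itertools.count(): if p**i > n: append(i-1); break' — fuel n.toNat + 2 is never
-- exhausted for the p ≥ 2 that Primes produces (2^(n.toNat+1) > n), so this is exact there.
def pvPowLoop (p n : Int) : Nat → Nat → Int
  | 0, i => (i : Int) - 1
  | fuel + 1, i => if n < p ^ i then (i : Int) - 1 else pvPowLoop p n fuel (i + 1)

-- LCM(n); 'res *= p**powers[i]' walks primes and powers in lockstep (same lengths), i.e. zip.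
-- powers[i] ≥ 0 whenever primes is nonempty (then n ≥ 2), so the .toNat exponent is exact.
def pvLCM (n : Int) : Int :=
  let primes := pvPrimes n
  let powers := primes.map (fun p => pvPowLoop p n (n.toNat + 2) 0)
  (primes.zip powers).foldl (fun res pe => res * pe.1 ^ pe.2.toNat) 1

def EnergyKernel (t : List Int) (len_tot : Int) : List Int :=
  let lcm := pvLCM (len_tot - 1)
  -- (len_tot - len(t)) * [0]: a negative count gives [] in Python, exactly .toNat
  let kern := List.replicate (len_tot - (t.length : Int)).toNat (0 : Int)
  (PySem.List.enumerate t 0).foldl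
    (fun kern p =>
      if p.2 == 0 then kern
      else
        (PySem.List.pyRange 0 (kern.length : Int) 1).foldl
          (fun K j =>
            PySem.List.pySetD K j
              (PySem.List.pyGetD K j 0 +
                PySem.Int.floordiv lcm ((t.length : Int) - p.1 + j) * PySem.List.pyGetD t p.1 0))
          kern)
    kern

-- ===== PORT B =====
-- pack(xs) = int.from_bytes(b"".join(x.to_bytes(bb,'little') for x in xs), 'little'):
-- little-endian concatenation of bb-byte blocks IS base-2^(8·bb) positional notation, so with
-- base = 2^(8·bb) its exact value is the positional fold below (B only packs 0 ≤ x < base).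
def pvPack (base : Int) (xs : List Int) : Int := xs.foldr (fun x n => n * base + x) 0

def EnergyKernel_alt (t : List Int) (len_tot : Int) : List Int :=
  let L : Int := (t.length : Int)
  let m := len_tot - L
  if m ≤ 0 then []
  else
    let lcm := pvLCM (len_tot - 1)
    if L = 0 then List.replicate m.toNat 0
    else
      -- nb = (...).bit_length() + 1 (a nonneg Python int, hence Nat); bb = (nb + 7) // 8
      let nb : Nat := PySem.Int.bitLength (((t.map (fun x => |x|)).sum + 1) * lcm) + 1
      let bb : Nat := (nb + 7) / 8
      let base : Int := 2 ^ (8 * bb)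
      let W := pvPack base ((PySem.List.pyRange 1 len_tot 1).map (fun d => PySem.Int.floordiv lcm d))
      let prodp := pvPack base (t.map (fun x => if 0 < x then x else 0)) * W
      let prodn := pvPack base (t.map (fun x => if x < 0 then -x else 0)) * W
      -- int.from_bytes(dp[(L-1+j)*bb:(L+j)*bb], 'little') reads digit slot L-1+j of the
      -- nonnegative product written with total = (L+len_tot)*bb bytes (which covers it):
      -- exactly prod // base^(L-1+j) % base.
      (PySem.List.pyRange 0 m 1).map (fun j =>
        PySem.Int.mod (PySem.Int.floordiv prodp (base ^ (L - 1 + j).toNat)) base -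
        PySem.Int.mod (PySem.Int.floordiv prodn (base ^ (L - 1 + j).toNat)) base)

-- ===== PRECONDITION & SPEC =====
def Spec_EnergyKernel (t : List Int) (len_tot : Int) (out : List Int) : Prop := out = EnergyKernel_alt t len_tot
instance (t : List Int) (len_tot : Int) (out : List Int) : Decidable (Spec_EnergyKernel t len_tot out) := by unfold Spec_EnergyKernel; infer_instance

-- ===== CLAIM (what is proved, stated in full; the proofs are below) =====
def Claim_equal_EnergyKernel : Prop := ∀ (t : List Int) (len_tot : Int), Dom_EnergyKernel t len_tot → Spec_EnergyKernel t len_tot (EnergyKernel t len_tot)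

-- ===== LEMMAS AND PROOFS =====

-- ---- A-side loop characterization ----

theorem pv_setD_getD (w : List Int) (m k : Nat) (v : Int) :
    (w.set m v).getD k 0 = if m = k ∧ k < w.length then v else w.getD k 0 := by
  simp [List.getD_eq_getElem?_getD, List.getElem?_set]
  split_ifs <;> simp_all

theorem pv_addLoop (g : Int → Int) :
    ∀ (fuel : Nat) (a : Int) (kern : List Int), 0 ≤ a → (kern.length : Int) - a ≤ (fuel : Int) →
      ((PySem.List.pyRange a (kern.length : Int) 1).foldl
          (fun K j => PySem.List.pySetD K j (PySem.List.pyGetD K j 0 + g j)) kern).length = kern.length ∧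
      ∀ k : Nat, k < kern.length →
        ((PySem.List.pyRange a (kern.length : Int) 1).foldl
            (fun K j => PySem.List.pySetD K j (PySem.List.pyGetD K j 0 + g j)) kern).getD k 0 =
          if a ≤ (k : Int) then kern.getD k 0 + g (k : Int) else kern.getD k 0 := by
  intro fuel
  induction fuel with
  | zero =>
    intro a kern ha hle
    rw [PySem.List.pyRange_one_eq_nil (by omega)]
    exact ⟨rfl, fun k hk => by rw [if_neg (by omega)]; rfl⟩
  | succ n ih =>
    intro a kern ha hle
    by_cases hab : (kern.length : Int) ≤ a
    · rw [PySem.List.pyRange_one_eq_nil hab]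
      exact ⟨rfl, fun k hk => by rw [if_neg (by omega)]; rfl⟩
    · rw [PySem.List.pyRange_one_cons (by omega)]
      simp only [List.foldl_cons]
      have hw1 : PySem.List.pySetD kern a (PySem.List.pyGetD kern a 0 + g a) =
          kern.set a.toNat (kern.getD a.toNat 0 + g a) := by
        rw [PySem.List.pySetD_of_nonneg _ _ ha, PySem.List.pyGetD_of_nonneg _ _ ha]
      have hlen1 : (PySem.List.pySetD kern a (PySem.List.pyGetD kern a 0 + g a)).length = kern.length := by
        rw [hw1, List.length_set]
      obtain ⟨hlen, hget⟩ := ih (a + 1) (PySem.List.pySetD kern a (PySem.List.pyGetD kern a 0 + g a))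
        (by omega) (by omega)
      rw [hlen1] at hlen hget
      constructor
      · exact hlen
      · intro k hk
        rw [hget k hk, hw1, pv_setD_getD]
        split_ifs with h1 h2 h3 h4 <;> try rfl
        all_goals try omega
        all_goals (rw [show ((k : Nat) : Int) = a from by omega,
                       show a.toNat = k from by omega])

theorem pv_outerLoop (t : List Int) (lcm : Int) :
    ∀ (ps : List (Int × Int)) (kern : List Int),
      (ps.foldl
          (fun kern p =>
            if p.2 == 0 then kern
            else
              (PySem.List.pyRange 0 (kern.length : Int) 1).foldl
                (fun K j =>
                  PySem.List.pySetD K j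
                    (PySem.List.pyGetD K j 0 +
                      PySem.Int.floordiv lcm ((t.length : Int) - p.1 + j) * PySem.List.pyGetD t p.1 0))
                kern) kern).length = kern.length ∧
      ∀ k : Nat, k < kern.length →
        (ps.foldl
            (fun kern p =>
              if p.2 == 0 then kern
              else
                (PySem.List.pyRange 0 (kern.length : Int) 1).foldl
                  (fun K j =>
                    PySem.List.pySetD K j
                      (PySem.List.pyGetD K j 0 +
                        PySem.Int.floordiv lcm ((t.length : Int) - p.1 + j) * PySem.List.pyGetD t p.1 0))
                  kern) kern).getD k 0 =
          kern.getD k 0 +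
            (ps.map (fun p =>
              if p.2 == 0 then 0
              else PySem.Int.floordiv lcm ((t.length : Int) - p.1 + (k : Int)) * PySem.List.pyGetD t p.1 0)).sum := by
  intro ps
  induction ps with
  | nil => intro kern; exact ⟨rfl, fun k hk => by simp⟩
  | cons p rest ih =>
    intro kern
    simp only [List.foldl_cons, List.map_cons, List.sum_cons]
    by_cases hp : p.2 == 0
    · rw [if_pos hp]
      obtain ⟨hlen, hget⟩ := ih kern
      refine ⟨hlen, fun k hk => ?_⟩
      rw [hget k hk, if_pos hp]
      ring
    · rw [if_neg hp]
      obtain ⟨hlen1, hget1⟩ := pv_addLoop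
        (fun j => PySem.Int.floordiv lcm ((t.length : Int) - p.1 + j) * PySem.List.pyGetD t p.1 0)
        kern.length 0 kern (le_refl 0) (by omega)
      obtain ⟨hlen, hget⟩ := ih ((PySem.List.pyRange 0 (kern.length : Int) 1).foldl
        (fun K j =>
          PySem.List.pySetD K j
            (PySem.List.pyGetD K j 0 +
              PySem.Int.floordiv lcm ((t.length : Int) - p.1 + j) * PySem.List.pyGetD t p.1 0))
        kern)
      refine ⟨by rw [hlen, hlen1], fun k hk => ?_⟩
      rw [hget k (by rw [hlen1]; exact hk), hget1 k hk, if_pos (by omega), if_neg hp]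
      ring

-- ---- positivity of the LCM ----

theorem pvPrimes_aux (l : List Int) :
    ∀ (acc : List Int), (∀ x ∈ acc, 2 ≤ x) → (∀ x ∈ l, 2 ≤ x) →
      ∀ x ∈ l.foldl
        (fun primes i => if primes.all (fun p => PySem.Int.mod i p != 0) then primes ++ [i] else primes)
        acc, 2 ≤ x := by
  induction l with
  | nil => intro acc hacc _ x hx; exact hacc x hx
  | cons i rest ih =>
    intro acc hacc hl x hx
    simp only [List.foldl_cons] at hx
    refine ih _ ?_ (fun y hy => hl y (by simp [hy])) x hx
    intro y hy
    split_ifs at hy with h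
    · rcases List.mem_append.1 hy with h1 | h1
      · exact hacc y h1
      · simp at h1; subst h1; exact hl y (by simp)
    · exact hacc y hy

theorem pvPrimes_two_le (n : Int) : ∀ p ∈ pvPrimes n, 2 ≤ p := by
  intro p hp
  refine pvPrimes_aux _ [] (by simp) ?_ p hp
  intro x hx
  exact (PySem.List.mem_pyRange_one.1 hx).1

theorem pvMulFold_pos :
    ∀ (ps : List (Int × Int)) (res : Int), 0 < res → (∀ p ∈ ps, 0 < p.1) →
      0 < ps.foldl (fun res pe => res * pe.1 ^ pe.2.toNat) res := by
  intro ps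
  induction ps with
  | nil => intro res h _; exact h
  | cons p rest ih =>
    intro res h hall
    simp only [List.foldl_cons]
    exact ih _ (mul_pos h (pow_pos (hall p (by simp)) _)) (fun q hq => hall q (by simp [hq]))

theorem pvLCM_pos (n : Int) : 0 < pvLCM n := by
  unfold pvLCM
  refine pvMulFold_pos _ 1 one_pos ?_
  intro p hp
  have := pvPrimes_two_le n p.1 (List.of_mem_zip hp).1
  omega

-- ---- B-side: packing, convolution, digit extraction ----

-- pointwise sum of two digit lists (the shorter one padded with zeros)
def pvAddP : List Int → List Int → List Int
  | xs, [] => xs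
  | [], y :: ys => y :: ys
  | x :: xs, y :: ys => (x + y) :: pvAddP xs ys

-- the digit list of the polynomial product (coefficient convolution)
def pvConv : List Int → List Int → List Int
  | [], _ => []
  | x :: xs, w => pvAddP (w.map (fun u => x * u)) (0 :: pvConv xs w)

theorem pvPack_addP (base : Int) :
    ∀ (a c : List Int), pvPack base (pvAddP a c) = pvPack base a + pvPack base c := by
  intro a
  induction a with
  | nil => intro c; cases c <;> simp [pvAddP, pvPack]
  | cons x xs ih =>
    intro c
    cases c with
    | nil => simp [pvAddP, pvPack]
    | cons y ys =>
      simp only [pvAddP, pvPack, List.foldr_cons]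
      have := ih ys
      simp only [pvPack] at this
      rw [this]; ring

theorem pvPack_map_mul (base x : Int) :
    ∀ (w : List Int), pvPack base (w.map (fun u => x * u)) = x * pvPack base w := by
  intro w
  induction w with
  | nil => simp [pvPack]
  | cons u us ih =>
    simp only [List.map_cons, pvPack, List.foldr_cons]
    simp only [pvPack] at ih
    rw [ih]; ring

theorem pvPack_conv (base : Int) :
    ∀ (xs w : List Int), pvPack base (pvConv xs w) = pvPack base xs * pvPack base w := by
  intro xs
  induction xs with
  | nil => intro w; simp [pvConv, pvPack]
  | cons x xs ih =>
    intro w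
    simp only [pvConv]
    rw [pvPack_addP, pvPack_map_mul]
    have h0 : pvPack base (0 :: pvConv xs w) = pvPack base (pvConv xs w) * base + 0 := rfl
    rw [h0, ih]
    have hc : pvPack base (x :: xs) = pvPack base xs * base + x := rfl
    rw [hc]; ring

-- digit extraction: slot k of a packed list of in-range digits
theorem pvExt (base : Int) (hb : 1 < base) :
    ∀ (k : Nat) (l : List Int), (∀ e ∈ l, 0 ≤ e ∧ e < base) →
      pvPack base l / base ^ k % base = l.getD k 0 := by
  intro k
  induction k with
  | zero =>
    intro l hl
    cases l with
    | nil => simp [pvPack]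
    | cons x xs =>
      have hc : pvPack base (x :: xs) = pvPack base xs * base + x := rfl
      rw [hc]
      simp only [pow_zero, Int.ediv_one, List.getD_cons_zero]
      rw [add_comm, mul_comm, Int.add_mul_emod_self_left]
      exact Int.emod_eq_of_lt (hl x (by simp)).1 (hl x (by simp)).2
  | succ k ih =>
    intro l hl
    cases l with
    | nil => simp [pvPack]
    | cons x xs =>
      have hxs : ∀ e ∈ xs, 0 ≤ e ∧ e < base := fun e he => hl e (by simp [he])
      have hc : pvPack base (x :: xs) = pvPack base xs * base + x := rfl
      have hsplit : pvPack base (x :: xs) / base ^ (k + 1) = pvPack base xs / base ^ k := by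
        rw [pow_succ']
        rw [← Int.ediv_ediv_of_nonneg (by omega : (0:Int) ≤ base)]
        congr 1
        rw [hc, add_comm, Int.add_mul_ediv_right _ _ (by omega : base ≠ 0),
            Int.ediv_eq_zero_of_lt (hl x (by simp)).1 (hl x (by simp)).2, zero_add]
      rw [hsplit, List.getD_cons_succ]
      exact ih xs hxs

theorem pvAddP_getD :
    ∀ (a c : List Int) (k : Nat), (pvAddP a c).getD k 0 = a.getD k 0 + c.getD k 0 := by
  intro a
  induction a with
  | nil => intro c k; cases c <;> simp [pvAddP]
  | cons x xs ih =>
    intro c k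
    cases c with
    | nil => simp [pvAddP]
    | cons y ys =>
      cases k with
      | zero => simp [pvAddP]
      | succ k =>
        show (pvAddP xs ys).getD k 0 = xs.getD k 0 + ys.getD k 0
        exact ih ys k

theorem pvMap_getD (f : Int → Int) (hf : f 0 = 0) (l : List Int) (k : Nat) :
    (l.map f).getD k 0 = f (l.getD k 0) := by
  by_cases h : k < l.length
  · simp [List.getD_eq_getElem?_getD, List.getElem?_map, List.getElem?_eq_getElem h]
  · rw [List.getD_eq_default _ _ (by simpa using (by omega : l.length ≤ k)),
        List.getD_eq_default _ _ (by omega : l.length ≤ k), hf]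

-- coefficient formula for the convolution digits
theorem pvConv_getD :
    ∀ (xs w : List Int) (k : Nat),
      (pvConv xs w).getD k 0 =
        ((List.range xs.length).map
          (fun i => xs.getD i 0 * (if i ≤ k then w.getD (k - i) 0 else 0))).sum := by
  intro xs
  induction xs with
  | nil => intro w k; simp [pvConv]
  | cons x xs ih =>
    intro w k
    simp only [pvConv, pvAddP_getD]
    rw [pvMap_getD (fun u => x * u) (by ring) w k]
    have hrange : List.range (x :: xs).length = 0 :: (List.range xs.length).map Nat.succ := by
      simp [List.range_succ_eq_map]
    rw [hrange, List.map_cons, List.sum_cons, List.map_map]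
    have h0 : (x :: xs).getD 0 0 * (if 0 ≤ k then w.getD (k - 0) 0 else 0) = x * w.getD k 0 := by
      simp
    rw [h0]
    congr 1
    cases k with
    | zero =>
      have : (0 :: pvConv xs w).getD 0 0 = 0 := rfl
      rw [this]
      symm
      apply List.sum_eq_zero
      intro y hy
      simp only [List.mem_map] at hy
      obtain ⟨i, _, hi⟩ := hy
      simp [Function.comp] at hi
      exact hi.symm
    | succ k =>
      rw [List.getD_cons_succ, ih w k]
      apply congrArg List.sum
      apply List.map_congr_left
      intro i _
      simp only [Function.comp]
      have h1 : (x :: xs).getD (i + 1) 0 = xs.getD i 0 := List.getD_cons_succ ..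
      have h2 : (i + 1 ≤ k + 1) = (i ≤ k) := by simp
      have h3 : k + 1 - (i + 1) = k - i := by omega
      rw [h1, h3]
      have h4 : (i.succ ≤ k + 1) ↔ (i ≤ k) := by omega
      simp only [h4]

-- ---- main equivalence ----

-- difference of two sums over the same index list
theorem pvSum_sub (l : List Nat) (f g : Nat → Int) :
    (l.map (fun x => f x - g x)).sum = (l.map f).sum - (l.map g).sum := by
  induction l with
  | nil => simp
  | cons x xs ih => simp only [List.map_cons, List.sum_cons, ih]; ring

theorem pvRange_abs (t : List Int) :
    (List.range t.length).map (fun i => |t.getD i 0|) = t.map (fun x => |x|) := by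
  apply List.ext_getElem
  · simp
  · intro i h1 h2
    simp [List.getD_eq_getElem?_getD, List.getElem?_eq_getElem (by simpa using h1 : i < t.length)]

theorem pv_main (t : List Int) (len_tot : Int) :
    EnergyKernel t len_tot = EnergyKernel_alt t len_tot := by
  unfold EnergyKernel EnergyKernel_alt
  simp only []
  by_cases hm : len_tot - (t.length : Int) ≤ 0
  · rw [if_pos hm]
    obtain ⟨hlen, _⟩ := pv_outerLoop t (pvLCM (len_tot - 1)) (PySem.List.enumerate t 0)
      (List.replicate (len_tot - (t.length : Int)).toNat (0 : Int))
    refine List.eq_nil_of_length_eq_zero ?_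
    rw [hlen]
    simp
    omega
  · rw [if_neg hm]
    by_cases hL : (t.length : Int) = 0
    · rw [if_pos hL]
      have ht : t = [] := by
        cases t with
        | nil => rfl
        | cons a l => exfalso; simp at hL; omega
      subst ht
      simp [PySem.List.enumerate]
    · rw [if_neg hL]
      -- abbreviations
      have hL1 : 1 ≤ t.length := by omega
      have hmpos : 0 < len_tot - (t.length : Int) := by omega
      have hlcm : 0 < pvLCM (len_tot - 1) := pvLCM_pos _
      set lcm := pvLCM (len_tot - 1) with hlcmdef
      set S : Int := ((t.map (fun x => |x|)).sum + 1) * lcm with hSdef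
      set nb : Nat := PySem.Int.bitLength S + 1 with hnbdef
      set bb : Nat := (nb + 7) / 8 with hbbdef
      set base : Int := (2 : Int) ^ (8 * bb) with hbasedef
      set wr := (PySem.List.pyRange 1 len_tot 1).map (fun d => PySem.Int.floordiv lcm d) with hwrdef
      set tp := t.map (fun x => if 0 < x then x else 0) with htpdef
      set tn := t.map (fun x => if x < 0 then -x else 0) with htndef
      have habs_nonneg : 0 ≤ (t.map (fun x => |x|)).sum :=
        List.sum_nonneg (by intro x hx; simp at hx; obtain ⟨y, _, rfl⟩ := hx; exact abs_nonneg y)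
      have hSpos : 0 < S := by positivity
      have hbb1 : 1 ≤ bb := by
        have := Nat.div_add_mod (nb + 7) 8
        have := Nat.mod_lt (nb + 7) (by omega : 0 < 8)
        omega
      have h8bb : nb ≤ 8 * bb := by
        have h1 := Nat.div_add_mod (nb + 7) 8
        have h2 := Nat.mod_lt (nb + 7) (by omega : 0 < 8)
        omega
      have hbase2 : 1 < base := by
        have : (2:Int) ^ 1 ≤ (2:Int) ^ (8 * bb) := pow_le_pow_right₀ (by norm_num) (by omega)
        simpa using lt_of_lt_of_le (by norm_num : (1:Int) < 2^1) this
      have hbasepos : 0 < base := by omega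
      have hSbase : S < base := by
        have h1 : (S.natAbs : Int) < ((2 ^ PySem.Int.bitLength S : Nat) : Int) := by
          exact_mod_cast PySem.Int.lt_two_pow_bitLength S
        have h2 : (S.natAbs : Int) = S := Int.natAbs_of_nonneg hSpos.le
        have h3 : ((2 ^ PySem.Int.bitLength S : Nat) : Int) = (2:Int) ^ PySem.Int.bitLength S := by
          push_cast; ring
        have h4 : (2:Int) ^ PySem.Int.bitLength S ≤ base := by
          rw [hbasedef]
          exact pow_le_pow_right₀ (by norm_num) (by omega)
        omega
      -- the weight table
      have hwr_len : wr.length = (len_tot - 1).toNat := by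
        rw [hwrdef]; simp [PySem.List.length_pyRange_one]
      have hwr_get : ∀ j : Nat, j < (len_tot - 1).toNat →
          wr.getD j 0 = PySem.Int.floordiv lcm (1 + (j : Int)) := by
        intro j hj
        rw [hwrdef]
        rw [List.getD_eq_getElem _ 0 (by simpa [PySem.List.length_pyRange_one] using hj)]
        rw [List.getElem_map, PySem.List.getElem_pyRange_one]
      have hw_bounds : ∀ j : Nat, 0 ≤ wr.getD j 0 ∧ wr.getD j 0 ≤ lcm := by
        intro j
        by_cases hj : j < (len_tot - 1).toNat
        · rw [hwr_get j hj]
          rw [PySem.Int.floordiv_eq_ediv_of_pos (by omega : (0:Int) < 1 + j)]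
          exact ⟨Int.ediv_nonneg hlcm.le (by omega), Int.ediv_le_self _ hlcm.le⟩
        · rw [List.getD_eq_default _ _ (by omega : wr.length ≤ j)]
          exact ⟨le_refl 0, hlcm.le⟩
      -- the split parts of t
      have htp_get : ∀ i : Nat, tp.getD i 0 = if 0 < t.getD i 0 then t.getD i 0 else 0 := by
        intro i; rw [htpdef, pvMap_getD _ (by simp) t i]
      have htn_get : ∀ i : Nat, tn.getD i 0 = if t.getD i 0 < 0 then -t.getD i 0 else 0 := by
        intro i; rw [htndef, pvMap_getD _ (by simp) t i]
      have hpart_bounds : ∀ (u : List Int), (∀ i : Nat, 0 ≤ u.getD i 0 ∧ u.getD i 0 ≤ |t.getD i 0|) →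
          u.length = t.length → ∀ e ∈ pvConv u wr, 0 ≤ e ∧ e < base := by
        intro u hu hlen e he
        obtain ⟨idx, hidx, rfl⟩ := List.mem_iff_getElem.1 he
        rw [← List.getD_eq_getElem _ 0 hidx, pvConv_getD]
        constructor
        · apply List.sum_nonneg
          intro x hx
          simp only [List.mem_map] at hx
          obtain ⟨i, _, rfl⟩ := hx
          have h1 := (hu i).1
          have h2 := (hw_bounds (idx - i)).1
          split_ifs <;> positivity
        · have hle : ((List.range u.length).map
              (fun i => u.getD i 0 * (if i ≤ idx then wr.getD (idx - i) 0 else 0))).sum ≤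
              ((List.range u.length).map (fun i => |t.getD i 0| * lcm)).sum := by
            apply List.sum_le_sum
            intro i _
            have h1 := hu i
            have h2 := hw_bounds (idx - i)
            have h3 : (if i ≤ idx then wr.getD (idx - i) 0 else 0) ≤ lcm := by
              split_ifs; exact h2.2; exact hlcm.le
            have h4 : 0 ≤ (if i ≤ idx then wr.getD (idx - i) 0 else 0) := by
              split_ifs; exact h2.1; exact le_refl 0
            exact mul_le_mul h1.2 h3 h4 (abs_nonneg _)
          have heq : ((List.range u.length).map (fun i => |t.getD i 0| * lcm)).sum =
              (t.map (fun x => |x|)).sum * lcm := by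
            rw [hlen, ← pvRange_abs t]
            exact List.sum_map_mul_right _ _ _
          have : (t.map (fun x => |x|)).sum * lcm < S := by
            rw [hSdef]; nlinarith
          omega
      have htp_in : ∀ i : Nat, 0 ≤ tp.getD i 0 ∧ tp.getD i 0 ≤ |t.getD i 0| := by
        intro i; rw [htp_get]; split_ifs with h
        · constructor; omega; exact le_abs_self _
        · constructor; omega; exact abs_nonneg _
      have htn_in : ∀ i : Nat, 0 ≤ tn.getD i 0 ∧ tn.getD i 0 ≤ |t.getD i 0| := by
        intro i; rw [htn_get]; split_ifs with h
        · constructor; omega; rw [abs_of_neg h]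
        · constructor; omega; exact abs_nonneg _
      have hconvp := hpart_bounds tp htp_in (by rw [htpdef]; simp)
      have hconvn := hpart_bounds tn htn_in (by rw [htndef]; simp)
      -- A's loop characterization
      obtain ⟨hklen, hkget⟩ := pv_outerLoop t lcm (PySem.List.enumerate t 0)
        (List.replicate (len_tot - (t.length : Int)).toNat (0 : Int))
      apply List.ext_getElem
      · rw [hklen]
        simp [PySem.List.length_pyRange_one]
      · intro k h1 h2
        have hk : k < (List.replicate (len_tot - (t.length : Int)).toNat (0 : Int)).length := by
          rw [← hklen]; exact h1
        have hkm : (k : Int) < len_tot - (t.length : Int) := by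
          simp at hk; omega
        -- B's element
        rw [List.getElem_map, PySem.List.getElem_pyRange_one]
        rw [← List.getD_eq_getElem _ 0 h1, hkget k hk]
        have hrepl : (List.replicate (len_tot - (t.length : Int)).toNat (0 : Int)).getD k 0 = 0 := by
          simp [List.getD_eq_getElem?_getD]
        rw [hrepl, zero_add]
        -- digit index
        set K : Nat := ((t.length : Int) - 1 + (0 + (k : Int))).toNat with hKdef
        have hKval : (K : Int) = (t.length : Int) - 1 + (k : Int) := by
          rw [hKdef]; omega
        -- extract the digits of the two products
        rw [show pvPack base tp * pvPack base wr = pvPack base (pvConv tp wr) from (pvPack_conv base tp wr).symm]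
        rw [show pvPack base tn * pvPack base wr = pvPack base (pvConv tn wr) from (pvPack_conv base tn wr).symm]
        rw [PySem.Int.floordiv_eq_ediv_of_pos (pow_pos hbasepos K),
            PySem.Int.mod_eq_emod_of_pos hbasepos,
            PySem.Int.floordiv_eq_ediv_of_pos (pow_pos hbasepos K),
            PySem.Int.mod_eq_emod_of_pos hbasepos]
        rw [pvExt base hbase2 K (pvConv tp wr) hconvp,
            pvExt base hbase2 K (pvConv tn wr) hconvn]
        rw [pvConv_getD, pvConv_getD]
        have htplen : tp.length = t.length := by rw [htpdef]; simp
        have htnlen : tn.length = t.length := by rw [htndef]; simp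
        rw [htplen, htnlen, ← pvSum_sub]
        -- A's element as the same sum
        rw [PySem.List.enumerate_eq_map_pyRange t 0, List.map_map]
        rw [PySem.List.pyRange_one, List.map_map]
        have hlen0 : (((PySem.List.len t) : Int) - 0).toNat = t.length := by
          simp [PySem.List.len_eq]
        rw [hlen0]
        apply congrArg List.sum
        apply List.map_congr_left
        intro i hi
        rw [List.mem_range] at hi
        simp only [Function.comp, zero_add, PySem.List.pyGetD_natCast]
        have hiK : i ≤ K := by omega
        rw [if_pos hiK]
        have hKi : K - i < (len_tot - 1).toNat := by omega
        rw [hwr_get (K - i) hKi]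
        have harg : (1 : Int) + ((K - i : Nat) : Int) = (t.length : Int) - (i : Int) + (k : Int) := by
          omega
        rw [harg]
        rw [htp_get, htn_get]
        simp only [List.getD_eq_getElem?_getD, beq_iff_eq]
        rcases lt_trichotomy (t[i]?.getD 0) 0 with h0 | h0 | h0 <;>
          split_ifs
        all_goals try ring
        all_goals (exfalso; omega)

-- ===== VERDICT (by name: the statement is the Claim_ definition above) =====
theorem EnergyKernel_spec : Claim_equal_EnergyKernel := by
  intro t len_tot _
  unfold Spec_EnergyKernel
  exact pv_main t len_tot
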